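-- pv_equiv track=rewrite | github.com/Gotszalk/Org-Chart-Py | orgChartA.py | generateLevel
-- ===== SOURCE A (Python) =====
-- def findChildren(parent, structure):
--
-- 	children =[]
-- 	for employee in structure:
-- 		if employee[2] == parent:
-- 			children.append(employee)
-- 	return children
--
-- def generateLevel(parents, structure):
--
-- 	content = ""
--
-- 	for parent in parents:
-- 			children = findChildren(parent[0], structure)
--
-- 			content += """<li><div>""" + parent[0] + "<br />" + parent[1] + '</div>'
--
-- 			if len(children)>0:
-- 				#recurence if there are children
-- 				content += """
-- 				<ol>""" + generateLevel(children, structure) + """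
-- 					</ol>
-- 					"""
-- 	return content
-- ===== SOURCE B (Python) =====
-- def generateLevel(parents, structure):
-- 	# Iterative preorder DFS with an explicit stack instead of recursion.
-- 	content = ""
-- 	stack = [("node", p) for p in reversed(parents)]
-- 	while stack:
-- 		kind, item = stack.pop()
-- 		if kind == "text":
-- 			content += item
-- 		else:
-- 			content += "<li><div>" + item[0] + "<br />" + item[1] + "</div>"
-- 			kids = [e for e in structure if e[2] == item[0]]
-- 			if kids:
-- 				content += "\n\t\t\t\t<ol>"
-- 				stack.append(("text", "\n\t\t\t\t\t</ol>\n\t\t\t\t\t"))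
-- 				stack.extend(("node", k) for k in reversed(kids))
-- 	return content
-- ===== Notes on version B (the rewrite author's own statement) =====
-- stated objective: alternative
-- what changed: Replaces A's recursion (generateLevel calling itself per child level, plus the findChildren helper loop) by a single iterative preorder DFS over an explicit stack that holds work items and close-tag sentinel strings, popping children in original order.
import Mathlib
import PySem

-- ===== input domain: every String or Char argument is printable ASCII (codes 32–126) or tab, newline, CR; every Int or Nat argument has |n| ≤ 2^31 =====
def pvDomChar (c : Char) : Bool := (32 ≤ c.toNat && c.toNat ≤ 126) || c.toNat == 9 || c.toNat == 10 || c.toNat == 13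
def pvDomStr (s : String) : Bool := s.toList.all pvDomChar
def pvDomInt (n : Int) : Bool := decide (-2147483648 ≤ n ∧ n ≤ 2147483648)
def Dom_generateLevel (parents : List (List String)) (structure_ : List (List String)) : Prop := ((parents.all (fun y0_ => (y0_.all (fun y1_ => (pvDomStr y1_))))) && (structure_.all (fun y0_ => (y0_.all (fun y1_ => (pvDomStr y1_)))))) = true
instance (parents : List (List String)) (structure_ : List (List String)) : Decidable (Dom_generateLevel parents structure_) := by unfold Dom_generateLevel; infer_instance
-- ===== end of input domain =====

-- B replaces A's recursion by a single iterative preorder DFS over an explicit stack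
-- (close-tag sentinels pushed on the stack); objective: alternative decomposition, same cost.

-- ===== PORT A =====
-- employee[2] / parent[0] / parent[1]: PySem.List.pyGet? = none is Python's IndexError,
-- excluded by Pre_; .getD "" collapses it to keep the port total.
def findChildren (parent : String) (structure_ : List (List String)) : List (List String) :=
  structure_.foldl
    (fun children employee =>
      if ((PySem.List.pyGet? employee 2).getD "" == parent) then children ++ [employee]
      else children) []

-- fuel = recursion depth; on Pre_ inputs (acyclic reachable part) the real depth is at
-- most structure_.length + 1, so the fuel guard never fires there (it only makes the
-- transliteration total).
def pvGenA : Nat → List (List String) → List (List String) → String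
  | 0, _, _ => ""
  | fuel + 1, parents, structure_ =>
    parents.foldl
      (fun content parent =>
        let children := findChildren ((PySem.List.pyGet? parent 0).getD "") structure_
        let content := content ++ "<li><div>" ++ (PySem.List.pyGet? parent 0).getD ""
            ++ "<br />" ++ (PySem.List.pyGet? parent 1).getD "" ++ "</div>"
        if children.length > 0 then
          content ++ "\n\t\t\t\t<ol>" ++ pvGenA fuel children structure_
            ++ "\n\t\t\t\t\t</ol>\n\t\t\t\t\t"
        else content) ""

def generateLevel (parents : List (List String)) (structure_ : List (List String)) : String :=
  pvGenA (structure_.length + 1) parents structure_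

-- ===== PORT B =====
-- Stack items of Source B's loop: ("text", t) close-tag sentinels and ("node", employee) work
-- items.  The Nat on `node` is a depth counter that only makes the loop total (it mirrors
-- A's fuel and never reaches 0 on Pre_ inputs); Source B needs none.
inductive PvItem where
  | text : String → PvItem
  | node : List String → Nat → PvItem
deriving Repr, DecidableEq

-- weight of a depth-d node for the termination measure: pvW n d > n * pvW n (d-1) + 1
def pvW (n : Nat) : Nat → Nat
  | 0 => 1
  | d + 1 => 2 + n * pvW n d

def pvWeight (n : Nat) : PvItem → Nat
  | .text _ => 1
  | .node _ d => pvW n d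

theorem pvSumConst {α : Type} (c : Nat) (l : List α) :
    (l.map (fun _ => c)).sum = l.length * c := by
  induction l with
  | nil => simp
  | cons a l ih => simp only [List.map_cons, List.sum_cons, List.length_cons,
      Nat.succ_mul, ih]; omega

-- Source B represents the stack as a list popped from the end after pushing reversed(parents)
-- and reversed(kids); here the stack is a List PvItem whose HEAD is the top, so parents
-- and kids are pushed in original order — the same elements are popped in the same order.
def pvRun (structure_ : List (List String)) : List PvItem → String → String
  | [], content => content
  | PvItem.text t :: rest, content => pvRun structure_ rest (content ++ t)
  | PvItem.node _ 0 :: rest, content => pvRun structure_ rest content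
  | PvItem.node item (d + 1) :: rest, content =>
      let content := content ++ "<li><div>" ++ (PySem.List.pyGet? item 0).getD ""
          ++ "<br />" ++ (PySem.List.pyGet? item 1).getD "" ++ "</div>"
      let kids := structure_.filter
        (fun e => (PySem.List.pyGet? e 2).getD "" == (PySem.List.pyGet? item 0).getD "")
      if kids.isEmpty then pvRun structure_ rest content
      else pvRun structure_
        (kids.map (fun k => PvItem.node k d)
          ++ (PvItem.text "\n\t\t\t\t\t</ol>\n\t\t\t\t\t" :: rest))
        (content ++ "\n\t\t\t\t<ol>")
termination_by stack _ => (stack.map (pvWeight structure_.length)).sum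
decreasing_by
  all_goals simp only [List.map_append, List.sum_append, List.map_map, List.map_cons,
    List.sum_cons, Function.comp_def, List.unattach_filter, List.unattach_attach,
    pvWeight, pvW, pvSumConst]
  all_goals try omega
  all_goals
    have hk := List.length_filter_le
      (fun e => (PySem.List.pyGet? e 2).getD "" == (PySem.List.pyGet? item 0).getD "") structure_
  all_goals
    have hm := Nat.mul_le_mul_right (pvW structure_.length d) hk
  all_goals omega

def generateLevel_alt (parents : List (List String)) (structure_ : List (List String)) : String :=
  pvRun structure_ (parents.map (fun p => PvItem.node p (structure_.length + 1))) ""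

-- ===== PRECONDITION & SPEC =====
-- index j is a child (via name equality on employee[2] / employee[0]) of index i
def pvSuccs (structure_ : List (List String)) (name : String) : List Nat :=
  (List.range structure_.length).filter
    (fun j => ((structure_.getD j []).getD 2 "" == name))

def pvStep (structure_ : List (List String)) (cur : List Nat) : List Nat :=
  (cur ++ cur.flatMap (fun i => pvSuccs structure_ ((structure_.getD i []).getD 0 ""))).dedup

def pvReach (structure_ : List (List String)) : Nat → List Nat → List Nat
  | 0, cur => cur
  | k + 1, cur => pvReach structure_ k (pvStep structure_ cur)

-- indices of employees that A's recursion actually visits, starting from `parents`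
def pvVisited (parents : List (List String)) (structure_ : List (List String)) : List Nat :=
  pvReach structure_ structure_.length
    ((List.range structure_.length).filter
      (fun j => parents.any (fun p => (structure_.getD j []).getD 2 "" == p.getD 0 "")))

-- Pre_ is exactly where the Python A returns: every visited row must have the indexed
-- fields (else IndexError; with parents = [] nothing is indexed), and no employee visited
-- by the recursion may lie on a cycle of the child relation (else A recurses forever).
def Pre_generateLevel (parents : List (List String)) (structure_ : List (List String)) : Prop :=
  (parents = [] ∨
    ((∀ p ∈ parents, 2 ≤ p.length) ∧ (∀ e ∈ structure_, 3 ≤ e.length))) ∧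
  (∀ i ∈ pvVisited parents structure_,
    i ∉ pvReach structure_ structure_.length
        (pvSuccs structure_ ((structure_.getD i []).getD 0 "")))

instance (parents : List (List String)) (structure_ : List (List String)) : Decidable (Pre_generateLevel parents structure_) := by
  unfold Pre_generateLevel; infer_instance

def pvWitness_generateLevel : List (List String) × List (List String) :=
  ([["a", "boss"]], [["c", "dev", "a"], ["d", "qa", "c"]])

def Spec_generateLevel (parents : List (List String)) (structure_ : List (List String)) (out : String) : Prop := out = generateLevel_alt parents structure_
instance (parents : List (List String)) (structure_ : List (List String)) (out : String) : Decidable (Spec_generateLevel parents structure_ out) := by unfold Spec_generateLevel; infer_instance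

-- ===== CLAIM (what is proved, stated in full; the proofs are below) =====
def Claim_equal_generateLevel : Prop := ∀ (parents : List (List String)) (structure_ : List (List String)), Dom_generateLevel parents structure_ → Pre_generateLevel parents structure_ → Spec_generateLevel parents structure_ (generateLevel parents structure_)

-- ===== LEMMAS AND PROOFS =====

theorem pvWitness_ok :
    Dom_generateLevel pvWitness_generateLevel.1 pvWitness_generateLevel.2 ∧
    Pre_generateLevel pvWitness_generateLevel.1 pvWitness_generateLevel.2 := by
  decide

-- A's findChildren is a filter
theorem findChildren_eq_filter (parent : String) (structure_ : List (List String)) :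
    findChildren parent structure_
      = structure_.filter (fun e => (PySem.List.pyGet? e 2).getD "" == parent) := by
  have h : ∀ (l : List (List String)) (acc : List (List String)),
      l.foldl (fun children employee =>
        if ((PySem.List.pyGet? employee 2).getD "" == parent) then children ++ [employee]
        else children) acc
        = acc ++ l.filter (fun e => (PySem.List.pyGet? e 2).getD "" == parent) := by
    intro l
    induction l with
    | nil => simp
    | cons e l ih =>
      intro acc
      rw [List.foldl_cons, List.filter_cons]
      by_cases he : ((PySem.List.pyGet? e 2).getD "" == parent) = true
      · rw [if_pos he, if_pos he, ih]; simp
      · rw [if_neg he, if_neg he, ih]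
  unfold findChildren
  exact h structure_ []

-- the foldl body of pvGenA appends, so it is a homomorphism in the accumulator
theorem pvGenA_foldl_hom (fuel : Nat) (structure_ : List (List String)) :
    ∀ (ps : List (List String)) (c : String),
      ps.foldl (fun content parent =>
        let children := findChildren ((PySem.List.pyGet? parent 0).getD "") structure_
        let content := content ++ "<li><div>" ++ (PySem.List.pyGet? parent 0).getD ""
            ++ "<br />" ++ (PySem.List.pyGet? parent 1).getD "" ++ "</div>"
        if children.length > 0 then
          content ++ "\n\t\t\t\t<ol>" ++ pvGenA fuel children structure_
            ++ "\n\t\t\t\t\t</ol>\n\t\t\t\t\t"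
        else content) c
      = c ++ ps.foldl (fun content parent =>
        let children := findChildren ((PySem.List.pyGet? parent 0).getD "") structure_
        let content := content ++ "<li><div>" ++ (PySem.List.pyGet? parent 0).getD ""
            ++ "<br />" ++ (PySem.List.pyGet? parent 1).getD "" ++ "</div>"
        if children.length > 0 then
          content ++ "\n\t\t\t\t<ol>" ++ pvGenA fuel children structure_
            ++ "\n\t\t\t\t\t</ol>\n\t\t\t\t\t"
        else content) "" := by
  intro ps
  induction ps with
  | nil => simp
  | cons p ps ih =>
    intro c
    simp only [List.foldl_cons]
    conv_lhs => rw [ih]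
    conv_rhs => rw [ih]
    split <;> simp [String.append_assoc]

-- the central simulation: a block of depth-d node items behaves like pvGenA d
theorem pvRun_nodes (structure_ : List (List String)) :
    ∀ (d : Nat) (ps : List (List String)) (rest : List PvItem) (content : String),
      pvRun structure_ (ps.map (fun p => PvItem.node p d) ++ rest) content
        = pvRun structure_ rest (content ++ pvGenA d ps structure_) := by
  intro d
  induction d with
  | zero =>
    intro ps
    induction ps with
    | nil => intro rest content; simp [pvGenA]
    | cons p ps ih =>
      intro rest content
      simp only [List.map_cons, List.cons_append]
      rw [pvRun, ih]
      simp [pvGenA]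
  | succ d ihd =>
    intro ps
    induction ps with
    | nil => intro rest content; simp [pvGenA]
    | cons p ps ih =>
      intro rest content
      simp only [List.map_cons, List.cons_append]
      rw [pvRun]
      simp only [← findChildren_eq_filter]
      rw [show pvGenA (d + 1) (p :: ps) structure_
            = (let children := findChildren ((PySem.List.pyGet? p 0).getD "") structure_
               let c1 := "" ++ "<li><div>" ++ (PySem.List.pyGet? p 0).getD ""
                   ++ "<br />" ++ (PySem.List.pyGet? p 1).getD "" ++ "</div>"
               if children.length > 0 then
                 c1 ++ "\n\t\t\t\t<ol>" ++ pvGenA d children structure_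
                   ++ "\n\t\t\t\t\t</ol>\n\t\t\t\t\t"
               else c1) ++ pvGenA (d + 1) ps structure_
        from by
          conv_lhs => rw [pvGenA]
          rw [List.foldl_cons, pvGenA_foldl_hom]
          rw [pvGenA]]
      by_cases hk : (findChildren ((PySem.List.pyGet? p 0).getD "") structure_).isEmpty = true
      · rw [if_pos hk, ih]
        have hnil : findChildren ((PySem.List.pyGet? p 0).getD "") structure_ = [] :=
          List.isEmpty_iff.mp hk
        simp [hnil, String.append_assoc]
      · rw [if_neg hk]
        have hlen : (findChildren ((PySem.List.pyGet? p 0).getD "") structure_).length > 0 := by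
          cases h : findChildren ((PySem.List.pyGet? p 0).getD "") structure_ with
          | nil => rw [h] at hk; simp at hk
          | cons a l => simp
        rw [ihd, pvRun, ih]
        simp [hlen, String.append_assoc]

-- ===== VERDICT (by name: the statement is the Claim_ definition above) =====
theorem generateLevel_spec : Claim_equal_generateLevel := by
  intro parents structure_ _ _
  unfold Spec_generateLevel generateLevel generateLevel_alt
  rw [show parents.map (fun p => PvItem.node p (structure_.length + 1))
        = parents.map (fun p => PvItem.node p (structure_.length + 1)) ++ [] by simp]
  rw [pvRun_nodes, pvRun]
  simp
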